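-- pv_equiv track=rewrite | github.com/PLSE-Lab/Python-MLAPI-expl | python_sources/unwrapping-the-covid-19-genomes.py | low_value_position
-- ===== SOURCE A (Python) =====
-- def low_value_position(matrix):
--     # cell value with min value
--     minimum_value = float('inf')
--     position_x = -1
--     position_y = -1
--
--     # traverse the entire matrix  to find the smallest value
--     for i in range(len(matrix)):
--         for j in range(len(matrix[i])):
--             if (matrix[i][j] < minimum_value):
--                 minimum_value = matrix[i][j]
--                 position_x = i
--                 position_y = j
--     return position_x, position_y
-- ===== SOURCE B (Python) =====
-- def low_value_position(matrix):
--     # Phase 1: per-row first strict minimum (value, row index, col index); empty rows skipped.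
--     row_minima = []
--     for i, row in enumerate(matrix):
--         if row:
--             best_v, best_j = row[0], 0
--             for j in range(1, len(row)):
--                 if row[j] < best_v:
--                     best_v, best_j = row[j], j
--             row_minima.append((best_v, i, best_j))
--     # Phase 2: pick the first row entry with the strictly smallest value.
--     pos = (-1, -1)
--     best = None
--     for v, i, j in row_minima:
--         if best is None or v < best:
--             best = v
--             pos = (i, j)
--     return pos
-- ===== Notes on version B (the rewrite author's own statement) =====
-- stated objective: alternative
-- what changed: Replaces the single nested scan carrying one global (min,x,y) state with a two-phase decomposition: first build a list of per-row first strict minima (value,row,col), then select the first entry with the smallest value.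
import Mathlib
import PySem

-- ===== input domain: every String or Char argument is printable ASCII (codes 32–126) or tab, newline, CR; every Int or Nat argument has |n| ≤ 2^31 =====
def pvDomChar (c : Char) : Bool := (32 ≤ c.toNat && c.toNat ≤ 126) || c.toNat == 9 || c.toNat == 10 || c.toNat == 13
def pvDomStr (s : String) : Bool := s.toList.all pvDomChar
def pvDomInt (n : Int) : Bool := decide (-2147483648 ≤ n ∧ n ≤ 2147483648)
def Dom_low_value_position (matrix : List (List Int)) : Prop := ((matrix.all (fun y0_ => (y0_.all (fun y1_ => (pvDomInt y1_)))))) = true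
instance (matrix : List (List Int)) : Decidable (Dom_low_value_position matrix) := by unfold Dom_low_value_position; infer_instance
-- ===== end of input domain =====

-- B replaces A's single nested scan with a two-phase decomposition (per-row first strict minima, then a selection pass); alternative structure, same cost.


-- ===== PORT A =====
-- state = (minimum_value : Option Int  -- none = float('inf'), position_x, position_y)
-- inner loop: for j in range(len(matrix[i])), element x = matrix[i][j]
def innerA (i : Int) : List Int → Int → Option Int × Int × Int → Option Int × Int × Int
  | [], _, st => st
  | x :: xs, j, st =>
    match st with
    | (none, _, _) => innerA i xs (j + 1) (some x, i, j)
    | (some m, px, py) =>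
      if x < m then innerA i xs (j + 1) (some x, i, j)
      else innerA i xs (j + 1) (some m, px, py)

-- outer loop: for i in range(len(matrix))
def outerA : List (List Int) → Int → Option Int × Int × Int → Option Int × Int × Int
  | [], _, st => st
  | r :: rs, i, st => outerA rs (i + 1) (innerA i r 0 st)

def low_value_position (matrix : List (List Int)) : Int × Int :=
  (outerA matrix 0 (none, -1, -1)).2

-- ===== PORT B =====
-- inner scan of a non-empty row: (best_v, best_j) over the tail, j starting at 1
def rowScan : List Int → Int → Int → Int → Int × Int
  | [], _, bv, bj => (bv, bj)
  | x :: xs, j, bv, bj =>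
    if x < bv then rowScan xs (j + 1) x j else rowScan xs (j + 1) bv bj

-- Phase 1: list of (row minimum value, row index, col index); empty rows skipped
def buildRows : List (List Int) → Int → List (Int × Int × Int)
  | [], _ => []
  | [] :: rs, i => buildRows rs (i + 1)
  | (x :: xs) :: rs, i =>
    ((rowScan xs 1 x 0).1, i, (rowScan xs 1 x 0).2) :: buildRows rs (i + 1)

-- Phase 2: first entry with strictly smallest value
def selectB : List (Int × Int × Int) → Option Int → Int × Int → Int × Int
  | [], _, pos => pos
  | (v, i, j) :: ts, none, _ => selectB ts (some v) (i, j)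
  | (v, i, j) :: ts, some b, pos =>
    if v < b then selectB ts (some v) (i, j) else selectB ts (some b) pos

def low_value_position_alt (matrix : List (List Int)) : Int × Int :=
  selectB (buildRows matrix 0) none (-1, -1)

-- ===== PRECONDITION & SPEC =====
def Spec_low_value_position (matrix : List (List Int)) (out : Int × Int) : Prop := out = low_value_position_alt matrix
instance (matrix : List (List Int)) (out : Int × Int) : Decidable (Spec_low_value_position matrix out) := by unfold Spec_low_value_position; infer_instance

-- ===== CLAIM (what is proved, stated in full; the proofs are below) =====
def Claim_equal_low_value_position : Prop := ∀ (matrix : List (List Int)), Dom_low_value_position matrix → Spec_low_value_position matrix (low_value_position matrix)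

-- ===== LEMMAS AND PROOFS =====

-- first strict minimum of a list with its index (spec-side helper)
def rmin : List Int → Int → Option (Int × Int)
  | [], _ => none
  | x :: xs, j =>
    match rmin xs (j + 1) with
    | none => some (x, j)
    | some (v, k) => if v < x then some (v, k) else some (x, j)

-- selectB lifted to carry the full (best, pos) state
def selS : List (Int × Int × Int) → Option Int × Int × Int → Option Int × Int × Int
  | [], st => st
  | (v, i, j) :: ts, (none, _, _) => selS ts (some v, i, j)
  | (v, i, j) :: ts, (some b, px, py) =>
    if v < b then selS ts (some v, i, j) else selS ts (some b, px, py)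

theorem selectB_eq_selS (ts : List (Int × Int × Int)) (b : Option Int) (p : Int × Int) :
    selectB ts b p = (selS ts (b, p.1, p.2)).2 := by
  induction ts generalizing b p with
  | nil => simp [selectB, selS]
  | cons t ts ih =>
    obtain ⟨v, i, j⟩ := t
    cases b with
    | none => simp [selectB, selS, ih]
    | some m =>
      by_cases h : v < m <;> simp [selectB, selS, h, ih]

theorem innerA_some (row : List Int) (i m px py : Int) (j : Int) :
    innerA i row j (some m, px, py) =
      match rmin row j with
      | none => (some m, px, py)
      | some (v, k) => if v < m then (some v, i, k) else (some m, px, py) := by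
  induction row generalizing j m px py with
  | nil => simp [innerA, rmin]
  | cons x xs ih =>
    simp only [innerA, rmin]
    by_cases hx : x < m <;> simp only [hx, if_true, if_false, ih] <;>
      rcases h : rmin xs (j + 1) with _ | ⟨v, k⟩ <;>
        simp only [h] <;>
          (try (by_cases hvx : v < x <;> simp only [hvx, if_true, if_false])) <;>
          repeat' split <;> simp_all <;> omega

theorem innerA_none (row : List Int) (i px py : Int) (j : Int) :
    innerA i row j (none, px, py) =
      match rmin row j with
      | none => (none, px, py)
      | some (v, k) => (some v, i, k) := by
  cases row with
  | nil => simp [innerA, rmin]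
  | cons x xs =>
    simp only [innerA, innerA_some, rmin]
    rcases h : rmin xs (j + 1) with _ | ⟨v, k⟩ <;> simp only [h] <;>
      split_ifs <;> rfl

theorem rowScan_eq (xs : List Int) (j bv bj : Int) :
    rowScan xs j bv bj =
      match rmin xs j with
      | none => (bv, bj)
      | some (v, k) => if v < bv then (v, k) else (bv, bj) := by
  induction xs generalizing j bv bj with
  | nil => simp [rowScan, rmin]
  | cons x xs ih =>
    simp only [rowScan, rmin]
    by_cases hx : x < bv <;> simp only [hx, if_true, if_false, ih] <;>
      rcases h : rmin xs (j + 1) with _ | ⟨v, k⟩ <;>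
        simp only [h] <;>
          (try (by_cases hvx : v < x <;> simp only [hvx, if_true, if_false])) <;>
          repeat' split <;> simp_all <;> omega

theorem outerA_eq_selS (m : List (List Int)) (i : Int) (st : Option Int × Int × Int) :
    outerA m i st = selS (buildRows m i) st := by
  induction m generalizing i st with
  | nil => simp [outerA, buildRows, selS]
  | cons r rs ih =>
    cases r with
    | nil => simp [outerA, buildRows, innerA, ih]
    | cons x xs =>
      obtain ⟨b, px, py⟩ := st
      cases b with
      | none =>
        simp only [outerA, buildRows, ih, rowScan_eq, innerA_none, rmin, zero_add]
        rcases h' : rmin xs 1 with _ | ⟨v, k⟩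
        · simp [selS]
        · by_cases hvx : v < x <;> simp [selS, hvx]
      | some bm =>
        simp only [outerA, buildRows, ih, rowScan_eq, innerA_some, rmin, zero_add]
        rcases h' : rmin xs 1 with _ | ⟨v, k⟩
        · by_cases hxb : x < bm <;> simp [selS, hxb]
        · by_cases hvx : v < x
          · by_cases hvb : v < bm <;> simp [selS, hvx, hvb]
          · by_cases hxb : x < bm <;> simp [selS, hvx, hxb]

-- ===== VERDICT (by name: the statement is the Claim_ definition above) =====
theorem low_value_position_spec : Claim_equal_low_value_position := by
  intro matrix _
  unfold Spec_low_value_position low_value_position low_value_position_alt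
  rw [outerA_eq_selS, selectB_eq_selS]
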